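-- pv_equiv track=rewrite | github.com/keenlychuang/bookbridge | bookbridge/utils.py | count_columns
-- ===== SOURCE A (Python) =====
-- def count_columns(row):
--     """
--     Counts the number of columns in a row, ignoring commas within quotes.
--     """
--     in_quotes = False
--     column_count = 0
--     for i, char in enumerate(row):
--         if char == '"' and (i == 0 or row[i-1] != '\\'):  # Check for non-escaped quote
--             in_quotes = not in_quotes
--         if char == ',' and not in_quotes:
--             column_count += 1
--     return column_count + 1  # Add one because column count is one more than comma count
-- ===== SOURCE B (Python) =====
-- def count_columns(row):
--     # Two-pass: record unescaped-quote positions, then count commas preceded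
--     # by an even number of them.
--     toggles = [i for i, c in enumerate(row) if c == '"' and (i == 0 or row[i-1] != '\\')]
--     cols = 1
--     for j, c in enumerate(row):
--         if c == ',' and sum(1 for t in toggles if t < j) % 2 == 0:
--             cols += 1
--     return cols
-- ===== Notes on version B (the rewrite author's own statement) =====
-- stated objective: alternative
-- what changed: Replaces A's single stateful scan with an in_quotes flag by two passes: first collect the index list of unescaped quote toggles, then count each comma by checking that the number of toggle positions before it is even.
import Mathlib
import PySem

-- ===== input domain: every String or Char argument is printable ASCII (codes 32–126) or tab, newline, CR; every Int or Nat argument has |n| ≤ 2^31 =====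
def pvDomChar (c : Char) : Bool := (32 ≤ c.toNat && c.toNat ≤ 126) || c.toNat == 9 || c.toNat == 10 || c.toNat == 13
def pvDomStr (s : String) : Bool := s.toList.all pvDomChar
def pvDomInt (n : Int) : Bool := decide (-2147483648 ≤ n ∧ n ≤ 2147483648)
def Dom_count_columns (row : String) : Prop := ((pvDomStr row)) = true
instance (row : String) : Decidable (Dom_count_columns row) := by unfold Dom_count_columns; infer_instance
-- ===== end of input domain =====

-- B replaces A's single flag-tracking scan by two passes: collect the positions of
-- unescaped quotes, then count the commas preceded by an even number of them (objective: alternative).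

-- ===== PORT A =====
def count_columns (row : String) : Int :=
  let r := (PySem.List.enumerate row.toList).foldl
    (fun (st : Bool × Int) (p : Int × Char) =>
      let in_quotes := if p.2 == '"' && (p.1 == 0 || !(PySem.List.pyGet? row.toList (p.1 - 1) == some '\\'))
        then !st.1 else st.1
      let column_count := if p.2 == ',' && !in_quotes then st.2 + 1 else st.2
      (in_quotes, column_count))
    (false, 0)
  r.2 + 1

-- ===== PORT B =====
def count_columns_alt (row : String) : Int :=
  let toggles : List Int :=
    ((PySem.List.enumerate row.toList).filter
      (fun p => p.2 == '"' && (p.1 == 0 || !(PySem.List.pyGet? row.toList (p.1 - 1) == some '\\')))).map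
      (fun p => p.1)
  (PySem.List.enumerate row.toList).foldl
    (fun cols (p : Int × Char) =>
      if p.2 == ',' &&
          (PySem.Int.mod (toggles.foldl (fun acc t => if t < p.1 then acc + 1 else acc) 0) 2 == 0)
      then cols + 1 else cols)
    1

-- ===== PRECONDITION & SPEC =====
def Spec_count_columns (row : String) (out : Int) : Prop := out = count_columns_alt row
instance (row : String) (out : Int) : Decidable (Spec_count_columns row out) := by unfold Spec_count_columns; infer_instance

-- ===== CLAIM (what is proved, stated in full; the proofs are below) =====
def Claim_equal_count_columns : Prop := ∀ (row : String), Dom_count_columns row → Spec_count_columns row (count_columns row)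

-- ===== LEMMAS AND PROOFS =====

/-- unescaped-quote test at an enumerated position (identical in both ports) -/
def tg (s : List Char) (p : Int × Char) : Bool :=
  p.2 == '"' && (p.1 == 0 || !(PySem.List.pyGet? s (p.1 - 1) == some '\\'))

/-- positions of unescaped quotes -/
def togs (s : List Char) : List Int :=
  ((PySem.List.enumerate s).filter (tg s)).map (fun p => p.1)

/-- A's loop body -/
def stepA (s : List Char) (st : Bool × Int) (p : Int × Char) : Bool × Int :=
  let in_quotes := if tg s p then !st.1 else st.1
  let column_count := if p.2 == ',' && !in_quotes then st.2 + 1 else st.2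
  (in_quotes, column_count)

/-- B's loop body -/
def stepB (tgl : List Int) (cols : Int) (p : Int × Char) : Int :=
  if p.2 == ',' &&
      (PySem.Int.mod (tgl.foldl (fun acc t => if t < p.1 then acc + 1 else acc) 0) 2 == 0)
  then cols + 1 else cols

lemma portA_eq (row : String) :
    count_columns row = ((PySem.List.enumerate row.toList).foldl (stepA row.toList) (false, 0)).2 + 1 := rfl

lemma portB_eq (row : String) :
    count_columns_alt row = (PySem.List.enumerate row.toList).foldl (stepB (togs row.toList)) 1 := rfl

/-- B's indicator at one position -/
def indB (tgl : List Int) (p : Int × Char) : Int :=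
  if p.2 == ',' && (PySem.Int.mod (tgl.foldl (fun acc t => if t < p.1 then acc + 1 else acc) 0) 2 == 0)
  then 1 else 0

lemma stepB_foldl (tgl : List Int) (l : List (Int × Char)) (a : Int) :
    l.foldl (stepB tgl) a = a + (l.map (indB tgl)).sum := by
  induction l generalizing a with
  | nil => simp
  | cons x xs ih =>
      simp only [List.foldl_cons, List.map_cons, List.sum_cons, ih]
      unfold stepB indB
      split <;> ring

lemma guard_countP (tgl : List Int) (j : Int) :
    (PySem.Int.mod (tgl.foldl (fun acc t => if t < j then acc + 1 else acc) 0) 2 == 0)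
      = decide (tgl.countP (fun t => decide (t < j)) % 2 = 0) := by
  rw [PySem.List.foldl_ite_add_one (fun t => t < j) tgl 0,
      PySem.Int.mod_eq_emod_of_pos (by norm_num : (0:Int) < 2)]
  rcases Nat.mod_two_eq_zero_or_one (tgl.countP (fun t => decide (t < j))) with h | h <;>
    simp [h] <;> omega

lemma enumerate_append_singleton (s : List Char) (c : Char) :
    PySem.List.enumerate (s ++ [c]) 0 = PySem.List.enumerate s 0 ++ [((s.length : Int), c)] := by
  rw [PySem.List.enumerate_append]
  simp [PySem.List.enumerate_cons, PySem.List.enumerate_nil]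

lemma tg_agree (s : List Char) (c : Char) (p : Int × Char)
    (hp : p ∈ PySem.List.enumerate s 0) : tg (s ++ [c]) p = tg s p := by
  rw [PySem.List.mem_enumerate_iff] at hp
  obtain ⟨k, hk, rfl⟩ := hp
  unfold tg
  by_cases h0 : k = 0
  · subst h0; simp
  · have h1 : ((0 : Int) + (k : Int)) - 1 = ((k - 1 : Nat) : Int) := by omega
    have h2 : k - 1 < s.length := by omega
    simp only [h1, PySem.List.pyGet?_natCast]
    rw [List.getElem?_append_left h2]

lemma stepA_agree (s : List Char) (c : Char) (st : Bool × Int) (p : Int × Char)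
    (hp : p ∈ PySem.List.enumerate s 0) : stepA (s ++ [c]) st p = stepA s st p := by
  unfold stepA
  rw [tg_agree s c p hp]

lemma togs_append (s : List Char) (c : Char) :
    togs (s ++ [c]) = togs s ++ (if tg (s ++ [c]) ((s.length : Int), c) then [(s.length : Int)] else []) := by
  unfold togs
  rw [enumerate_append_singleton, List.filter_append, List.map_append]
  congr 1
  · congr 1
    exact List.filter_congr (fun p hp => tg_agree s c p hp)
  · by_cases h : tg (s ++ [c]) ((s.length : Int), c) <;> simp [h]

lemma togs_lt (s : List Char) : ∀ t ∈ togs s, t < (s.length : Int) := by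
  intro t ht
  unfold togs at ht
  simp only [List.mem_map, List.mem_filter] at ht
  obtain ⟨p, ⟨hp, -⟩, rfl⟩ := ht
  rw [PySem.List.mem_enumerate_iff] at hp
  obtain ⟨k, hk, rfl⟩ := hp
  simp
  omega

lemma countP_togs_append (s : List Char) (c : Char) (j : Int) (hj : j ≤ (s.length : Int)) :
    (togs (s ++ [c])).countP (fun t => decide (t < j))
      = (togs s).countP (fun t => decide (t < j)) := by
  rw [togs_append, List.countP_append]
  have : (if tg (s ++ [c]) ((s.length : Int), c) then [(s.length : Int)] else []).countP
      (fun t => decide (t < j)) = 0 := by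
    split
    · simp
      omega
    · simp
  omega

lemma indB_agree (s : List Char) (c : Char) (p : Int × Char)
    (hp : p ∈ PySem.List.enumerate s 0) : indB (togs (s ++ [c])) p = indB (togs s) p := by
  have hp' := hp
  rw [PySem.List.mem_enumerate_iff] at hp'
  obtain ⟨k, hk, rfl⟩ := hp'
  unfold indB
  rw [guard_countP, guard_countP, countP_togs_append s c _ (by simp; omega)]

lemma countP_togs_all (s : List Char) :
    (togs s).countP (fun t => decide (t < (s.length : Int))) = (togs s).length := by
  rw [List.countP_eq_length]
  intro t ht
  simpa using togs_lt s t ht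

lemma main (s : List Char) :
    (PySem.List.enumerate s).foldl (stepA s) (false, 0)
      = (decide ((togs s).length % 2 = 1), ((PySem.List.enumerate s).map (indB (togs s))).sum) := by
  induction s using List.reverseRecOn with
  | nil => simp [togs, PySem.List.enumerate_nil]
  | append_singleton s c ih =>
    rw [enumerate_append_singleton, List.foldl_append, List.map_append, List.sum_append,
        PySem.List.foldl_congr_mem _ (stepA (s ++ [c])) (stepA s) _
          (fun st p hp => stepA_agree s c st p hp),
        List.map_congr_left (fun p hp => indB_agree s c p hp), ih]
    have hlen : (togs (s ++ [c])).length
        = (togs s).length + (if tg (s ++ [c]) ((s.length : Int), c) then 1 else 0) := by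
      rw [togs_append]
      split <;> simp
    have hguard : indB (togs (s ++ [c])) ((s.length : Int), c)
        = (if c == ',' && decide ((togs s).length % 2 = 0) then 1 else 0) := by
      unfold indB
      rw [guard_countP, countP_togs_append s c _ (le_refl _), countP_togs_all]
    simp only [List.foldl_cons, List.foldl_nil, List.map_cons, List.map_nil, List.sum_cons,
      List.sum_nil, hguard]
    unfold stepA
    by_cases hc : c = ','
    · have htg : tg (s ++ [c]) ((s.length : Int), c) = false := by
        subst hc; simp [tg]
      rw [hlen, htg]
      subst hc
      rcases Nat.mod_two_eq_zero_or_one (togs s).length with h | h <;> simp [h]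
    · have hc' : (c == ',') = false := by simp [hc]
      rw [hlen]
      rcases htg : tg (s ++ [c]) ((s.length : Int), c) <;>
        rcases Nat.mod_two_eq_zero_or_one (togs s).length with h | h <;>
          simp only [htg] <;> simp [hc', h, Nat.add_mod]

theorem count_columns_spec_aux (row : String) : count_columns row = count_columns_alt row := by
  rw [portA_eq, portB_eq, stepB_foldl, main]
  ring

-- ===== VERDICT (by name: the statement is the Claim_ definition above) =====
theorem count_columns_spec : Claim_equal_count_columns := by
  intro row _
  unfold Spec_count_columns
  exact count_columns_spec_aux row
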